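-- pv_equiv track=rewrite | github.com/jhkang1517/algo | programmers/training/120843.py | solution
-- ===== SOURCE A (Python) =====
-- def solution(numbers, k):
--     answer = 0
--
--     while numbers:
--         n = numbers.pop(0)
--         answer += 1
--
--         if answer == k:
--             return n
--
--         numbers.append(n)
--         numbers.append(numbers.pop(0))
--
--     return answer
-- ===== SOURCE B (Python) =====
-- def solution(numbers, k):
--     # Each loop iteration of the original rotates the list left by 2 and the
--     # k-th popped element is therefore the one at index 2*(k-1) mod len.
--     # (Unlike the original, this does not mutate/consume `numbers`.)
--     return numbers[(2 * (k - 1)) % len(numbers)]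
-- ===== Notes on version B (the rewrite author's own statement) =====
-- stated objective: faster
-- what changed: Replaces the O(k) pop/append rotation loop by the closed-form index 2*(k-1) mod len(numbers).
-- outside the precondition, e.g. on solution([], 3): A returns 0, B raises ZeroDivisionError
import Mathlib
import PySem

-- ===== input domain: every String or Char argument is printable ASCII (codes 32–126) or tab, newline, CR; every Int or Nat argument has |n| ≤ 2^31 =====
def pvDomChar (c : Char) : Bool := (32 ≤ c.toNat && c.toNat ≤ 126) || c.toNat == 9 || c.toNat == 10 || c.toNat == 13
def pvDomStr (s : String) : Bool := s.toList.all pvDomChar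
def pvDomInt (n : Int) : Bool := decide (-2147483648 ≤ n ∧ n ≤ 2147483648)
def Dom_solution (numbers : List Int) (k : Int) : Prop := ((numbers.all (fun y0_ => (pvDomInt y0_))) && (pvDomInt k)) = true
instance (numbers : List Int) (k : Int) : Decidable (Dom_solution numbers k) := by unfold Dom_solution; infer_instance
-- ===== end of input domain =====

-- B replaces A's O(k) pop/append rotation loop by the closed-form index
-- 2*(k-1) mod len(numbers) (return value only: A empties/rotates `numbers` in place, B does not mutate it).


-- ===== PORT A =====
-- The while loop: pop front (n), count, return n when count == k; else append n and
-- rotate one more element front-to-back.  Under Pre_ the loop returns after exactly k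
-- iterations, so fuel k.toNat suffices; fuel 0 is only reached outside Pre_ (A diverges there).
def solutionLoopA : List Int → Int → Int → Nat → Int
  | _, answer, _, 0 => answer
  | [], answer, _, _ + 1 => answer
  | n :: rest, answer, k, fuel + 1 =>
    let answer := answer + 1
    if answer = k then n
    else
      match rest ++ [n] with
      | [] => answer   -- unreachable: rest ++ [n] is nonempty
      | m :: r2 => solutionLoopA (r2 ++ [m]) answer k fuel

def solution (numbers : List Int) (k : Int) : Int :=
  solutionLoopA numbers 0 k k.toNat

-- ===== PORT B =====
-- numbers[(2*(k-1)) % len(numbers)]; the .getD 0 default is never used under Pre_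
-- (in Python the empty list raises ZeroDivisionError, which Pre_ excludes).
def solution_alt (numbers : List Int) (k : Int) : Int :=
  (PySem.List.pyGet? numbers (PySem.Int.mod (2 * (k - 1)) numbers.length)).getD 0

-- ===== PRECONDITION & SPEC =====
-- Pre_ excludes the empty list, on which A returns the leftover counter 0 while B's
-- modulo raises ZeroDivisionError, and k ≤ 0, on which A loops forever (never returns).
def Pre_solution (numbers : List Int) (k : Int) : Prop := numbers ≠ [] ∧ 1 ≤ k
instance (numbers : List Int) (k : Int) : Decidable (Pre_solution numbers k) := by
  unfold Pre_solution; infer_instance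

def pvWitness_solution : List Int × Int := ([3, 1, 4, 1, 5], 7)

def Spec_solution (numbers : List Int) (k : Int) (out : Int) : Prop := out = solution_alt numbers k
instance (numbers : List Int) (k : Int) (out : Int) : Decidable (Spec_solution numbers k out) := by unfold Spec_solution; infer_instance

-- ===== CLAIM (what is proved, stated in full; the proofs are below) =====
def Claim_equal_solution : Prop := ∀ (numbers : List Int) (k : Int), Dom_solution numbers k → Pre_solution numbers k → Spec_solution numbers k (solution numbers k)

-- ===== LEMMAS AND PROOFS =====

-- One iteration of A's loop rotates the list left by 2.
lemma loopA_eq_rotate (k : Int) :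
    ∀ (fuel : Nat) (a : Int) (l : List Int), l ≠ [] → a + fuel = k → 1 ≤ fuel →
      solutionLoopA l a k fuel = (l.rotate (2 * (fuel - 1))).headI := by
  intro fuel
  induction fuel with
  | zero => intro a l _ _ h; omega
  | succ m ih =>
    intro a l hl hk _
    match l with
    | [] => exact absurd rfl hl
    | n :: rest =>
      simp only [solutionLoopA]
      by_cases h : a + 1 = k
      · have hm : m = 0 := by omega
        subst hm
        simp [h]
      · have hm : 1 ≤ m := by
          rcases Nat.eq_zero_or_pos m with h0 | h0
          · exfalso; apply h; omega
          · exact h0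
        have hne : rest ++ [n] ≠ [] := by simp
        match hrm : rest ++ [n] with
        | [] => exact absurd hrm hne
        | m0 :: r2 =>
          simp only [if_neg h]
          have hrec := ih (a + 1) (r2 ++ [m0]) (by simp) (by push_cast at hk ⊢; omega) hm
          rw [hrec]
          have hrot : (n :: rest).rotate 2 = r2 ++ [m0] := by
            rw [show (2 : Nat) = 1 + 1 from rfl, ← List.rotate_rotate]
            rw [List.rotate_cons_succ, List.rotate_zero, hrm,
                List.rotate_cons_succ, List.rotate_zero]
          rw [show r2 ++ [m0] = (n :: rest).rotate 2 from hrot.symm, List.rotate_rotate]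
          congr 2
          omega

lemma headI_rotate (l : List Int) (hl : l ≠ []) (j : Nat) :
    (l.rotate j).headI = l[j % l.length]'(Nat.mod_lt _ (List.length_pos_of_ne_nil hl)) := by
  have hlen : 0 < l.length := List.length_pos_of_ne_nil hl
  have hlr : (l.rotate j).length = l.length := List.length_rotate ..
  have hne : l.rotate j ≠ [] := by
    intro h; rw [h] at hlr; simp at hlr; omega
  have hgen : ∀ (xs : List Int) (h : xs ≠ []), xs.headI = xs.head h := by
    intro xs h
    cases xs with
    | nil => exact absurd rfl h
    | cons x t => simp
  rw [hgen _ hne, List.head_eq_getElem, List.getElem_rotate]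
  simp

theorem solution_spec_aux (numbers : List Int) (k : Int)
    (hne : numbers ≠ []) (hk : 1 ≤ k) :
    solution numbers k = solution_alt numbers k := by
  have hlen : 0 < numbers.length := List.length_pos_of_ne_nil hne
  have hfuel : 1 ≤ k.toNat := by omega
  -- A's side
  have hA : solution numbers k = (numbers.rotate (2 * (k.toNat - 1))).headI := by
    unfold solution
    exact loopA_eq_rotate k k.toNat 0 numbers hne (by omega) hfuel
  rw [hA, headI_rotate numbers hne]
  -- B's side
  unfold solution_alt
  set j : Nat := 2 * (k.toNat - 1) with hj
  have hcast : (2 : Int) * (k - 1) = (j : Int) := by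
    rw [hj]; push_cast; omega
  have hmod : PySem.Int.mod (2 * (k - 1)) numbers.length = ((j % numbers.length : Nat) : Int) := by
    rw [hcast]
    exact PySem.Int.mod_natCast j numbers.length
  rw [hmod, PySem.List.pyGet?_natCast]
  rw [List.getElem?_eq_getElem (Nat.mod_lt _ hlen)]
  rfl

-- ===== VERDICT (by name: the statement is the Claim_ definition above) =====
theorem solution_spec : Claim_equal_solution := by
  intro numbers k _ hpre
  exact solution_spec_aux numbers k hpre.1 hpre.2
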